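-- pv_equiv track=rewrite | github.com/EGordovskiy/Algorithms_for_Developers | Final_Sprint_1/B.Sleight_of_hand.py | hand_trainer
-- ===== SOURCE A (Python) =====
-- def hand_trainer(k, all_strings):
--     dt = {}
--     bonus = 0
--
--     for i in range(len(all_strings)):
--         dt[all_strings[i]] = dt.get(all_strings[i], 0) + 1
--
--     for i in dt.values():
--         if i <= 2 * k and i != 0:
--             bonus += 1
--
--     return bonus
-- ===== SOURCE B (Python) =====
-- def hand_trainer(k, all_strings):
--     # single pass: build the frequency dict and maintain the answer online
--     dt = {}
--     bonus = 0
--     for s in all_strings: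
--         c = dt.get(s, 0) + 1
--         dt[s] = c
--         if c == 1:
--             if c <= 2 * k:
--                 bonus += 1
--         elif c == 2 * k + 1:
--             bonus -= 1
--     return bonus
-- ===== Notes on version B (the rewrite author's own statement) =====
-- stated objective: alternative
-- what changed: B replaces A's two-phase build-the-frequency-dict-then-scan-its-values with a single pass that maintains the bonus online, incrementing when a string's count enters the range [1, 2k] and decrementing when it crosses 2k+1 and leaves it.
import Mathlib
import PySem

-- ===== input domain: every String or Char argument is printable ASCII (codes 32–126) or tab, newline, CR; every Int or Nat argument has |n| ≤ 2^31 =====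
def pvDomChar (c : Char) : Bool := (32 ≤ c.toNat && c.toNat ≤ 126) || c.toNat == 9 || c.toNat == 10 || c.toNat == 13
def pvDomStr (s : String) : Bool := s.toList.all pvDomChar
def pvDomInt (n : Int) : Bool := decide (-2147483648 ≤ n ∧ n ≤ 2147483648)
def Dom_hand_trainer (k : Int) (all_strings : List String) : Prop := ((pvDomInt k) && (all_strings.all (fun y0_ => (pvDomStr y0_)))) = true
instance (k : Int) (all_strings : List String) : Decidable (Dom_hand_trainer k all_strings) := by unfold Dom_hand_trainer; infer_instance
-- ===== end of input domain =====

-- B builds the frequency dict and maintains the answer online in one pass (a threshold-crossing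
-- accumulator), instead of A's build-then-scan over the dict values; same cost, different decomposition.

-- ===== PORT A =====
def hand_trainer (k : Int) (all_strings : List String) : Int :=
  let dt : PySem.Dict String Int :=
    (PySem.List.pyRange 0 (all_strings.length : Int) 1).foldl
      (fun d i => d.insert (PySem.List.pyGetD all_strings i "")
                           (d.getD (PySem.List.pyGetD all_strings i "") 0 + 1))
      PySem.Dict.empty
  dt.values.foldl (fun bonus i => if i ≤ 2*k ∧ i ≠ 0 then bonus + 1 else bonus) 0

-- ===== PORT B =====
def hand_trainer_alt (k : Int) (all_strings : List String) : Int :=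
  (all_strings.foldl
    (fun (st : PySem.Dict String Int × Int) s =>
      let c := st.1.getD s 0 + 1
      let dt := st.1.insert s c
      let bonus :=
        if c = 1 then (if c ≤ 2*k then st.2 + 1 else st.2)
        else if c = 2*k + 1 then st.2 - 1 else st.2
      (dt, bonus))
    (PySem.Dict.empty, 0)).2

-- ===== PRECONDITION & SPEC =====
def Spec_hand_trainer (k : Int) (all_strings : List String) (out : Int) : Prop := out = hand_trainer_alt k all_strings
instance (k : Int) (all_strings : List String) (out : Int) : Decidable (Spec_hand_trainer k all_strings out) := by unfold Spec_hand_trainer; infer_instance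

-- ===== CLAIM (what is proved, stated in full; the proofs are below) =====
def Claim_equal_hand_trainer : Prop := ∀ (k : Int) (all_strings : List String), Dom_hand_trainer k all_strings → Spec_hand_trainer k all_strings (hand_trainer k all_strings)

-- ===== LEMMAS AND PROOFS =====

-- the counting fold (dict build) both sides share, and the closed-form answer G
def pvD (p : List String) : PySem.Dict String Int :=
  p.foldl (fun d s => d.insert s (d.getD s 0 + 1)) PySem.Dict.empty

def pvG (k : Int) (p : List String) : Int :=
  ((PySem.Set.ofList p).countP (fun s => decide ((p.count s : Int) ≤ 2*k)) : Int)

theorem pvD_getD (p : List String) (s : String) : (pvD p).getD s 0 = (p.count s : Int) := by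
  simp [pvD, PySem.Dict.getD_foldl_insert_add_one]

theorem pvD_keys (p : List String) : (pvD p).keys = PySem.Set.ofList p := by
  simp [pvD, PySem.Dict.keys_foldl_insert, PySem.Dict.keys_empty, PySem.Set.update_nil_left]

theorem pvD_nodup (p : List String) : (pvD p).keys.Nodup := by
  rw [pvD_keys]; exact PySem.Set.nodup_ofList p

theorem pvD_append_singleton (p : List String) (x : String) :
    pvD (p ++ [x]) = (pvD p).insert x ((pvD p).getD x 0 + 1) := by
  simp [pvD]

-- countP after changing the predicate at one element of a Nodup list
theorem countP_update (x : String) (q q' : String → Bool) :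
    ∀ (ks : List String), ks.Nodup → x ∈ ks → (∀ s ∈ ks, s ≠ x → q' s = q s) →
    (ks.countP q' : Int) = (ks.countP q : Int)
      + ((if q' x then 1 else 0) - (if q x then 1 else 0)) := by
  intro ks
  induction ks with
  | nil => intro _ hx; simp at hx
  | cons a t ih =>
    intro hnd hx hagree
    rcases List.mem_cons.mp hx with rfl | hxt
    · have ht : ∀ s ∈ t, q' s = true ↔ q s = true := by
        intro s hs
        rw [hagree s (List.mem_cons_of_mem _ hs) (fun h => (List.nodup_cons.mp hnd).1 (h ▸ hs))]
      rw [List.countP_cons, List.countP_cons, List.countP_congr ht]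
      split_ifs <;> push_cast <;> omega
    · have hax : a ≠ x := fun h => (List.nodup_cons.mp hnd).1 (h ▸ hxt)
      have := ih (List.nodup_cons.mp hnd).2 hxt
        (fun s hs hsx => hagree s (List.mem_cons_of_mem _ hs) hsx)
      rw [List.countP_cons, List.countP_cons, hagree a (List.mem_cons_self) hax]
      push_cast at this ⊢
      rw [this]; ring

-- how the closed-form answer changes when one more string is appended: exactly B's step
theorem pvG_step (k : Int) (p : List String) (x : String) :
    pvG k (p ++ [x]) =
      (if ((p.count x : Int) + 1) = 1 then
        (if ((p.count x : Int) + 1) ≤ 2*k then pvG k p + 1 else pvG k p)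
      else if ((p.count x : Int) + 1) = 2*k + 1 then pvG k p - 1 else pvG k p) := by
  have hcount : ∀ s, (p ++ [x]).count s = p.count s + (if x = s then 1 else 0) := by
    intro s
    rw [List.count_append]
    by_cases h : x = s
    · subst h; simp
    · have hz : List.count s [x] = 0 := by
        rw [List.count_eq_zero]
        intro hmem
        simp at hmem
        exact h hmem.symm
      rw [hz, if_neg h]
  by_cases hx : x ∈ p
  · -- x already seen: the set is unchanged, only x's predicate may flip
    have hset : PySem.Set.ofList (p ++ [x]) = PySem.Set.ofList p := by
      rw [PySem.Set.ofList_append, PySem.Set.update_cons, PySem.Set.update_nil]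
      have : PySem.Set.add (PySem.Set.ofList p) x = PySem.Set.ofList p := by
        simp [PySem.Set.add]
        exact hx
      rw [this]
    have hpos : 1 ≤ p.count x := List.one_le_count_iff.mpr hx
    have hupd := countP_update x
      (fun s => decide ((p.count s : Int) ≤ 2*k))
      (fun s => decide (((p ++ [x]).count s : Int) ≤ 2*k))
      (PySem.Set.ofList p) (PySem.Set.nodup_ofList p)
      ((PySem.Set.mem_ofList _ _).mpr hx)
      (by intro s _ hsx
          have hne : ¬ x = s := fun h => hsx h.symm
          simp [hcount s, if_neg hne])
    have hpos' : (1:Int) ≤ (p.count x : Int) := by exact_mod_cast hpos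
    have hcx : List.count x (p ++ [x]) = List.count x p + 1 := by rw [hcount x]; simp
    unfold pvG
    rw [hset, hupd]
    simp only [hcx]
    rw [if_neg (by omega : ¬ ((p.count x : Int) + 1 = 1))]
    by_cases h2 : (p.count x : Int) + 1 = 2*k + 1
    · rw [if_pos h2]
      have hc1 : ¬ (((p.count x + 1 : Nat) : Int) ≤ 2*k) := by push_cast; omega
      have hc2 : ((p.count x : Nat) : Int) ≤ 2*k := by omega
      simp [hc2]
      split_ifs <;> omega
    · rw [if_neg h2]
      by_cases h3 : ((p.count x : Nat) : Int) ≤ 2*k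
      · have hc1 : ((p.count x + 1 : Nat) : Int) ≤ 2*k := by push_cast; omega
        simp [h3]
        split_ifs <;> omega
      · have hc1 : ¬ (((p.count x + 1 : Nat) : Int) ≤ 2*k) := by push_cast; omega
        simp [h3]
        omega
  · -- x is new: count x was 0, the set gains x at the end
    have hc0 : p.count x = 0 := List.count_eq_zero.mpr hx
    have hset : PySem.Set.ofList (p ++ [x]) = PySem.Set.ofList p ++ [x] := by
      rw [PySem.Set.ofList_append, PySem.Set.update_cons, PySem.Set.update_nil]
      simp [PySem.Set.add]
      exact hx
    unfold pvG
    rw [hset, List.countP_append]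
    have hrest : (PySem.Set.ofList p).countP (fun s => decide (((p ++ [x]).count s : Int) ≤ 2*k))
        = (PySem.Set.ofList p).countP (fun s => decide ((p.count s : Int) ≤ 2*k)) := by
      apply List.countP_congr
      intro s hs
      have hsx : x ≠ s := by
        intro h; exact hx ((PySem.Set.mem_ofList _ _).mp (h ▸ hs))
      simp [hcount s, if_neg hsx]
    rw [hrest]
    have hcx : List.count x (p ++ [x]) = 1 := by rw [hcount x]; simp [hc0]
    simp only [List.countP_singleton, hcx, hc0]
    rw [if_pos (by norm_num : ((0:Nat) : Int) + 1 = 1)]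
    push_cast
    simp only [decide_eq_true_eq]
    split_ifs <;> omega

-- B's loop computes (pvD, pvG) of the processed prefix
theorem alt_loop (k : Int) :
    ∀ (l p : List String),
    l.foldl
      (fun (st : PySem.Dict String Int × Int) s =>
        let c := st.1.getD s 0 + 1
        let dt := st.1.insert s c
        let bonus :=
          if c = 1 then (if c ≤ 2*k then st.2 + 1 else st.2)
          else if c = 2*k + 1 then st.2 - 1 else st.2
        (dt, bonus))
      (pvD p, pvG k p)
    = (pvD (p ++ l), pvG k (p ++ l)) := by
  intro l
  induction l with
  | nil => intro p; simp
  | cons x t ih =>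
    intro p
    rw [List.foldl_cons]
    have hstep :
        (let c := (pvD p).getD x 0 + 1
         let dt := (pvD p).insert x c
         let bonus :=
           if c = 1 then (if c ≤ 2*k then pvG k p + 1 else pvG k p)
           else if c = 2*k + 1 then pvG k p - 1 else pvG k p
         ((dt, bonus) : PySem.Dict String Int × Int))
        = (pvD (p ++ [x]), pvG k (p ++ [x])) := by
      simp only [pvD_getD, pvD_append_singleton, pvG_step, pvD_getD]
    rw [hstep, ih (p ++ [x])]
    simp

theorem alt_eq_G (k : Int) (l : List String) : hand_trainer_alt k l = pvG k l := by
  unfold hand_trainer_alt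
  have h0 : (PySem.Dict.empty, (0:Int)) = (pvD ([] : List String), pvG k ([] : List String)) := by
    simp [pvD, pvG]
  rw [h0, alt_loop k l []]
  simp

-- A's second loop is a countP over the dict values
theorem foldl_if_countP (P : Int → Prop) [DecidablePred P] :
    ∀ (vs : List Int) (b : Int),
    vs.foldl (fun bonus i => if P i then bonus + 1 else bonus) b
      = b + (vs.countP (fun i => decide (P i)) : Int) := by
  intro vs
  induction vs with
  | nil => intro b; simp
  | cons v t ih =>
    intro b
    rw [List.foldl_cons, ih]
    by_cases h : P v
    · simp [h]
      ring
    · simp [h]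

theorem a_eq_G (k : Int) (l : List String) : hand_trainer k l = pvG k l := by
  have hfold := PySem.List.foldl_pyRange_zero_pyGetD' l ""
      (fun (d : PySem.Dict String Int) (s : String) => d.insert s (d.getD s 0 + 1)) PySem.Dict.empty
  simp only [hand_trainer, hfold]
  have hdt : l.foldl (fun d s => d.insert s (d.getD s 0 + 1)) PySem.Dict.empty = pvD l := rfl
  rw [hdt, foldl_if_countP (fun i => i ≤ 2*k ∧ i ≠ 0)]
  rw [PySem.Dict.values_eq_map_keys (pvD l) (pvD_nodup l) 0, List.countP_map]
  rw [pvD_keys]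
  unfold pvG
  have : (PySem.Set.ofList l).countP
      ((fun i => decide (i ≤ 2*k ∧ i ≠ 0)) ∘ fun s => (pvD l).getD s 0)
      = (PySem.Set.ofList l).countP (fun s => decide ((l.count s : Int) ≤ 2*k)) := by
    apply List.countP_congr
    intro s hs
    have hpos : 1 ≤ l.count s := List.one_le_count_iff.mpr ((PySem.Set.mem_ofList _ _).mp hs)
    simp [Function.comp, pvD_getD]
    intro _
    omega
  rw [this]
  simp

-- ===== VERDICT (by name: the statement is the Claim_ definition above) =====
theorem hand_trainer_spec : Claim_equal_hand_trainer := by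
  intro k l _
  unfold Spec_hand_trainer
  rw [a_eq_G, alt_eq_G]
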